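-- pv_equiv track=rewrite | github.com/gaia-platform/GaiaPlatform | dev_tools/xyz/build_main_yaml.py | foobar
-- ===== SOURCE A (Python) =====
-- def foobar(prerun_outp):
--     current_section = None
--     build_map = {}
--     ordered_build_list = []
--     for i in prerun_outp:
--         if i.startswith("cd $GAIA_REPO/"):
--             current_section = i
--             ordered_build_list.append(i)
--             build_map[current_section] = []
--         if current_section and i.strip():
--             build_map[current_section].append(i)
--     return build_map, ordered_build_list
-- ===== SOURCE B (Python) =====
-- def foobar(prerun_outp):
--     # Segment decomposition: advance past the pre-header prefix, then repeatedly
--     # scan to the next header boundary and assign that segment's non-blank lines.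
--     def is_header(l):
--         return l.startswith("cd $GAIA_REPO/")
--
--     build_map = {}
--     ordered_build_list = []
--     n = len(prerun_outp)
--     i = 0
--     while i < n and not is_header(prerun_outp[i]):
--         i += 1
--     while i < n:
--         j = i + 1
--         while j < n and not is_header(prerun_outp[j]):
--             j += 1
--         h = prerun_outp[i]
--         ordered_build_list.append(h)
--         build_map[h] = [l for l in prerun_outp[i:j] if l.strip()]
--         i = j
--     return build_map, ordered_build_list
-- ===== Notes on version B (the rewrite author's own statement) =====
-- stated objective: alternative
-- what changed: B replaces A's single stateful loop (current_section flag, dict entry reset and appended line by line) with a segment decomposition: skip the pre-header prefix, then repeatedly peel one header-led segment off the front and assign its non-blank lines to the map in one step.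
import Mathlib
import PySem

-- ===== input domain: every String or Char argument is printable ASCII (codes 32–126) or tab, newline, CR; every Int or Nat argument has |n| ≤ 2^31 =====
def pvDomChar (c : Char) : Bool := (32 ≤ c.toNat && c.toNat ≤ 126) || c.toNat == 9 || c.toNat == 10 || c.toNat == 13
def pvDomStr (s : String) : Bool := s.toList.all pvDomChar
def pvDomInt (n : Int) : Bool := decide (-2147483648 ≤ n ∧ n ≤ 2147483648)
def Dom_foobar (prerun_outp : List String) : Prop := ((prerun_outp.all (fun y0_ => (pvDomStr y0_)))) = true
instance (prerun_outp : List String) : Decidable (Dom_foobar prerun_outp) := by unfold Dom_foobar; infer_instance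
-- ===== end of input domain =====

-- B cuts the input into header-led segments (drop the pre-header prefix, then peel one
-- segment per step) instead of A's single stateful loop; same cost, different decomposition.

-- ===== PORT A =====
-- one iteration of A's for-loop; 'current_section and i.strip()' = current_section is not
-- None (when set it is a header line, which is nonempty hence truthy) and i.strip() nonempty.
-- build_map[current_section].append(i): the key is always present, so modify with default [] is exact.
def pvStepA (st : Option String × PySem.Dict String (List String) × List String) (i : String) :
    Option String × PySem.Dict String (List String) × List String :=
  let st := if PySem.Str.startswith i "cd $GAIA_REPO/" then
      (some i, st.2.1.insert i [], st.2.2 ++ [i]) else st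
  match st.1 with
  | none => st
  | some c =>
      if PySem.Str.strip i = "" then st
      else (some c, st.2.1.modify c [] (fun v => v ++ [i]), st.2.2)

def foobar (prerun_outp : List String) : (List (String × List String)) × List String :=
  let fin := prerun_outp.foldl pvStepA (none, PySem.Dict.empty, [])
  (fin.2.1.items, fin.2.2)

-- ===== PORT B =====
def pvIsHeader (l : String) : Bool := PySem.Str.startswith l "cd $GAIA_REPO/"

-- B's second while loop: peel one header-led segment per iteration (the for/break loop
-- collecting body = takeWhile, rest[len(seg):] = dropWhile).
def pvAltGo (rest : List String) (bm : PySem.Dict String (List String)) (ord : List String) :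
    PySem.Dict String (List String) × List String :=
  match rest with
  | [] => (bm, ord)
  | h :: t =>
      let seg := h :: t.takeWhile (fun l => !pvIsHeader l)
      pvAltGo (t.dropWhile (fun l => !pvIsHeader l))
        (bm.insert h (seg.filter (fun l => PySem.Str.strip l != "")))
        (ord ++ [h])
termination_by rest.length
decreasing_by
  simp only [List.length_cons]
  exact Nat.lt_succ_of_le (List.length_dropWhile_le _ _)

-- B's first while loop (skip to the first header) is the dropWhile here.
def foobar_alt (prerun_outp : List String) : (List (String × List String)) × List String :=
  let fin := pvAltGo (prerun_outp.dropWhile (fun l => !pvIsHeader l)) PySem.Dict.empty []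
  (fin.1.items, fin.2)

-- ===== PRECONDITION & SPEC =====
def Spec_foobar (prerun_outp : List String) (out : (List (String × List String)) × List String) : Prop := out = foobar_alt prerun_outp
instance (prerun_outp : List String) (out : (List (String × List String)) × List String) : Decidable (Spec_foobar prerun_outp out) := by unfold Spec_foobar; infer_instance

-- ===== CLAIM (what is proved, stated in full; the proofs are below) =====
def Claim_equal_foobar : Prop := ∀ (prerun_outp : List String), Dom_foobar prerun_outp → Spec_foobar prerun_outp (foobar prerun_outp)

-- ===== LEMMAS AND PROOFS =====

-- a header line strips to a nonempty string (it starts with 'c')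
lemma pv_strip_ne (s : String) (h : PySem.Str.startswith s "cd $GAIA_REPO/" = true) :
    ¬ PySem.Str.strip s = "" := by
  intro he
  have hp : ("cd $GAIA_REPO/".toList) <+: s.toList :=
    (PySem.Chars.startswith_iff s.toList "cd $GAIA_REPO/".toList).1 h
  obtain ⟨t, ht⟩ := hp
  have hs : s.toList = 'c' :: ('d' :: " $GAIA_REPO/".toList ++ t) := by rw [← ht]; rfl
  have hch : PySem.Chars.strip s.toList = [] := by
    have := congrArg String.toList he
    simpa [PySem.Str.strip] using this
  unfold PySem.Chars.strip PySem.Chars.rstrip PySem.Chars.lstrip at hch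
  rw [hs] at hch
  have hc : PySem.Chars.isspace 'c' = false := by decide
  rw [List.dropWhile_cons, hc] at hch
  simp only [List.reverse_eq_nil_iff] at hch
  rw [List.dropWhile_eq_nil_iff] at hch
  have := hch 'c' (by simp)
  rw [hc] at this
  exact Bool.false_ne_true this

-- A's loop ignores non-header lines while current_section is None
lemma pv_skip (pre : List String) (hp : ∀ l ∈ pre, pvIsHeader l = false)
    (bm : PySem.Dict String (List String)) (ord : List String) :
    pre.foldl pvStepA (none, bm, ord) = (none, bm, ord) := by
  induction pre with
  | nil => rfl
  | cons l t ih =>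
    have hl : pvIsHeader l = false := hp l (by simp)
    rw [List.foldl_cons]
    have hstep : pvStepA (none, bm, ord) l = (none, bm, ord) := by
      simp [pvStepA, pvIsHeader] at hl ⊢
      simp [hl]
    rw [hstep]
    exact ih (fun x hx => hp x (by simp [hx]))

-- A's loop over the body of a section only appends non-blank lines to bm[c]
lemma pv_body (body : List String) (hb : ∀ l ∈ body, pvIsHeader l = false) :
    ∀ (c : String) (bm : PySem.Dict String (List String)) (ord : List String),
    body.foldl pvStepA (some c, bm, ord) =
      (some c,
       body.foldl (fun d l => if PySem.Str.strip l = "" then d else d.modify c [] (fun v => v ++ [l])) bm,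
       ord) := by
  induction body with
  | nil => intro c bm ord; rfl
  | cons l t ih =>
    intro c bm ord
    have hl : pvIsHeader l = false := hb l (by simp)
    simp [pvIsHeader] at hl
    rw [List.foldl_cons, List.foldl_cons]
    have hstep : pvStepA (some c, bm, ord) l =
        (some c, if PySem.Str.strip l = "" then bm else bm.modify c [] (fun v => v ++ [l]), ord) := by
      by_cases hs : PySem.Str.strip l = "" <;> simp [pvStepA, hl, hs]
    rw [hstep]
    by_cases hs : PySem.Str.strip l = "" <;>
      simp only [hs, if_pos, if_neg, ite_true, ite_false] <;>
      exact ih (fun x hx => hb x (by simp [hx])) c _ ord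

-- the accumulated appends to key c amount to one insert of the filtered body
lemma pv_fold_modify (body : List String) :
    ∀ (d : PySem.Dict String (List String)) (c : String) (v : List String),
    body.foldl (fun d l => if PySem.Str.strip l = "" then d else d.modify c [] (fun w => w ++ [l])) (d.insert c v) =
      d.insert c (v ++ body.filter (fun l => PySem.Str.strip l != "")) := by
  induction body with
  | nil => intro d c v; simp
  | cons l t ih =>
    intro d c v
    rw [List.foldl_cons]
    by_cases hs : PySem.Str.strip l = ""
    · simp only [hs, ite_true, if_pos]
      rw [ih]
      simp [List.filter_cons, hs]
    · have hmod : (d.insert c v).modify c [] (fun w => w ++ [l]) = d.insert c (v ++ [l]) := by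
        show (d.insert c v).insert c (((d.insert c v).getD c []) ++ [l]) = _
        rw [PySem.Dict.getD_insert_self, PySem.Dict.insert_insert_self]
      simp only [hs, if_neg, not_false_iff]
      rw [hmod, ih]
      simp [hs]

-- after dropWhile (!header), the list is empty or starts with a header
lemma pv_drop_cond (t : List String) :
    t.dropWhile (fun l => !pvIsHeader l) = [] ∨
      ∃ h' t', t.dropWhile (fun l => !pvIsHeader l) = h' :: t' ∧ pvIsHeader h' = true := by
  cases hd : t.dropWhile (fun l => !pvIsHeader l) with
  | nil => exact Or.inl rfl
  | cons h' t' =>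
    refine Or.inr ⟨h', t', rfl, ?_⟩
    have hne : t.dropWhile (fun l => !pvIsHeader l) ≠ [] := by rw [hd]; simp
    have h2 := List.head_dropWhile_not (fun l => !pvIsHeader l) hne
    have h3 : (t.dropWhile (fun l => !pvIsHeader l)).head hne = h' := by
      have h5 := List.head?_eq_some_head hne
      have h4 : (t.dropWhile (fun l => !pvIsHeader l)).head? = some h' := by rw [hd]; rfl
      exact (Option.some.inj (h4.symm.trans h5)).symm
    rw [h3] at h2
    simpa using h2

-- from a segment boundary on, A's fold computes exactly B's segment recursion
lemma pv_main : ∀ (n : ℕ) (rest : List String), rest.length ≤ n →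
    (rest = [] ∨ ∃ h t, rest = h :: t ∧ pvIsHeader h = true) →
    ∀ (cs : Option String) (bm : PySem.Dict String (List String)) (ord : List String),
    (rest.foldl pvStepA (cs, bm, ord)).2 = pvAltGo rest bm ord := by
  intro n
  induction n with
  | zero =>
    intro rest hlen hcond cs bm ord
    have : rest = [] := List.length_eq_zero_iff.1 (Nat.le_zero.1 hlen)
    subst this; simp [pvAltGo]
  | succ n ih =>
    intro rest hlen hcond cs bm ord
    rcases hcond with rfl | ⟨h, t, rfl, hh⟩
    · simp [pvAltGo]
    · have hh' : PySem.Str.startswith h "cd $GAIA_REPO/" = true := hh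
      have hstrip := pv_strip_ne h hh'
      rw [List.foldl_cons]
      have hstep : pvStepA (cs, bm, ord) h =
          (some h, bm.insert h ([] ++ [h]), ord ++ [h]) := by
        simp only [pvStepA, hh', if_pos]
        simp only [if_neg hstrip]
        show (some h, (bm.insert h []).insert h (((bm.insert h []).getD h []) ++ [h]), ord ++ [h]) = _
        rw [PySem.Dict.getD_insert_self, PySem.Dict.insert_insert_self]
      rw [hstep]
      have hdecomp : t = t.takeWhile (fun l => !pvIsHeader l) ++ t.dropWhile (fun l => !pvIsHeader l) :=
        (List.takeWhile_append_dropWhile).symm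
      conv_lhs => rw [hdecomp]
      rw [List.foldl_append]
      have htake : ∀ l ∈ t.takeWhile (fun l => !pvIsHeader l), pvIsHeader l = false := by
        intro l hl
        simpa using List.mem_takeWhile_imp hl
      rw [pv_body _ htake, pv_fold_modify]
      have hlen' : (t.dropWhile (fun l => !pvIsHeader l)).length ≤ n := by
        have := List.length_dropWhile_le (fun l => !pvIsHeader l) t
        simp only [List.length_cons] at hlen
        omega
      rw [ih _ hlen' (pv_drop_cond t)]
      rw [pvAltGo]
      congr 1
      simp only [List.filter_cons]
      have : (PySem.Str.strip h != "") = true := by simp [hstrip]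
      rw [this]
      simp

-- ===== VERDICT (by name: the statement is the Claim_ definition above) =====
theorem foobar_spec : Claim_equal_foobar := by
  intro p _hdom
  unfold Spec_foobar
  have hdecomp : p = p.takeWhile (fun l => !pvIsHeader l) ++ p.dropWhile (fun l => !pvIsHeader l) :=
    (List.takeWhile_append_dropWhile).symm
  have htake : ∀ l ∈ p.takeWhile (fun l => !pvIsHeader l), pvIsHeader l = false := by
    intro l hl
    simpa using List.mem_takeWhile_imp hl
  have key : (p.foldl pvStepA (none, PySem.Dict.empty, [])).2
      = pvAltGo (p.dropWhile (fun l => !pvIsHeader l)) PySem.Dict.empty [] := by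
    conv_lhs => rw [hdecomp]
    rw [List.foldl_append, pv_skip _ htake]
    exact pv_main (p.dropWhile (fun l => !pvIsHeader l)).length _ le_rfl (pv_drop_cond p)
      none PySem.Dict.empty []
  show ((p.foldl pvStepA (none, PySem.Dict.empty, [])).2.1.items,
        (p.foldl pvStepA (none, PySem.Dict.empty, [])).2.2) =
       ((pvAltGo (p.dropWhile (fun l => !pvIsHeader l)) PySem.Dict.empty []).1.items,
        (pvAltGo (p.dropWhile (fun l => !pvIsHeader l)) PySem.Dict.empty []).2)
  rw [key]
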